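-- pv_equiv track=rewrite | github.com/tomjrwilliams/ceg | src/ceg/app/rand.py | kwargs_ready
-- ===== SOURCE A (Python) =====
-- from typing import cast, Iterable, Callable
--
-- def kwargs_ready(
--     vs: list[str | None]
-- ) -> tuple[bool, list[str]]:
--     try:
--         end = vs.index(".")
--         return True, cast(list[str], vs[:end])
--     except:
--         if all([v is not None for v in vs]):
--             return True, cast(list[str], vs)
--         return False, []
-- ===== SOURCE B (Python) =====
-- def kwargs_ready(
--     vs: list[str | None]
-- ) -> tuple[bool, list[str]]:
--     # Right-to-left single pass: a three-state machine (1 = ok so far,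
--     # 0 = a "." has been seen to the right, 2 = failed: a None with no "." after it).
--     # out collects, in reversed order, the elements the answer keeps.
--     state = 1
--     out = []
--     for v in reversed(vs):
--         if v == ".":
--             state = 0
--             out = []
--         elif state == 0:
--             out.append(v)
--         elif v is None:
--             state = 2
--             out = []
--         elif state == 1:
--             out.append(v)
--     if state == 2:
--         return False, []
--     out.reverse()
--     return True, out
-- ===== Notes on version B (the rewrite author's own statement) =====
-- stated objective: alternative
-- what changed: Replaces A's try/except around .index plus slice and a separate all()-scan (two left-to-right passes) with a single right-to-left traversal driven by a three-state machine (ok / dot-seen / failed) that accumulates the kept elements back-to-front.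
-- outside the precondition, e.g. on kwargs_ready([None, '.']): A returns (True, [None]), B returns (True, [None])
import Mathlib
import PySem

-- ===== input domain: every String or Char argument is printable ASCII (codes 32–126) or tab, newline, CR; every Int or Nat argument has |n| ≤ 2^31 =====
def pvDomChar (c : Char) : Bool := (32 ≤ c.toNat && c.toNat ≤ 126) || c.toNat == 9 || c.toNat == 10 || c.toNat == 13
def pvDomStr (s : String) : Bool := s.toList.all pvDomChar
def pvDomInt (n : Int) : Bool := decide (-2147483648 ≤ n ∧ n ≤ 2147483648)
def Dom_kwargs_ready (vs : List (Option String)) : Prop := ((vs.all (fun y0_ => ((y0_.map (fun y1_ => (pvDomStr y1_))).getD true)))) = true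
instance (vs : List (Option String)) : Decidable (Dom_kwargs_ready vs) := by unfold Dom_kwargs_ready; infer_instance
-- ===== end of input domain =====

-- B replaces A's two left-to-right passes (try/except .index + slice, then all()-scan) by one right-to-left
-- three-state-machine pass building the result back-to-front; objective: alternative.
-- Pre_ excludes inputs where a None occurs before the first "." : there Python A returns a prefix containing None,
-- which is not a value of the declared return type list[str] (the cast is unchecked), so it is not representable as List String.


-- ===== PORT A =====
-- try: end = vs.index("."); return True, vs[:end]  /  except: all(...)-scan.
-- .filterMap id converts the List (Option String) slice to the declared List String; under Pre_ the slice contains no none.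
def kwargs_ready (vs : List (Option String)) : Bool × List String :=
  match PySem.List.index? vs (some ".") with
  | some e => (true, (PySem.List.slice vs none (some (e : Int))).filterMap id)
  | none =>
    if (vs.map (fun v => !(v == none))).all (fun b => b) then (true, vs.filterMap id)
    else (false, [])

-- ===== PORT B =====
-- the loop body of Source B: state 1 = ok so far, 0 = "." seen to the right, 2 = failed
def kwargsReadyStep : (Nat × List (Option String)) → Option String → Nat × List (Option String)
  | (state, out), v =>
    if v == some "." then (0, [])
    else if state == 0 then (0, out ++ [v])
    else if v == none then (2, [])
    else if state == 1 then (1, out ++ [v])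
    else (state, out)

def kwargs_ready_alt (vs : List (Option String)) : Bool × List String :=
  let s := vs.reverse.foldl kwargsReadyStep (1, [])
  if s.1 == 2 then (false, [])
  else (true, s.2.reverse.filterMap id)

-- ===== PRECONDITION & SPEC =====
-- Pre_ excludes inputs with a None before the first "." : Python A returns a list containing None there
-- (not a value of the declared type list[str]); Python B returns the same unrepresentable value.
def Pre_kwargs_ready (vs : List (Option String)) : Prop :=
  some "." ∈ vs → none ∉ vs.takeWhile (fun v => !(v == some "."))
instance (vs : List (Option String)) : Decidable (Pre_kwargs_ready vs) := by unfold Pre_kwargs_ready; infer_instance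
def pvWitness_kwargs_ready : List (Option String) := [some "a", some ".", none]

def Spec_kwargs_ready (vs : List (Option String)) (out : Bool × List String) : Prop := out = kwargs_ready_alt vs
instance (vs : List (Option String)) (out : Bool × List String) : Decidable (Spec_kwargs_ready vs out) := by unfold Spec_kwargs_ready; infer_instance

-- ===== CLAIM (what is proved, stated in full; the proofs are below) =====
def Claim_equal_kwargs_ready : Prop := ∀ (vs : List (Option String)), Dom_kwargs_ready vs → Pre_kwargs_ready vs → Spec_kwargs_ready vs (kwargs_ready vs)

-- ===== LEMMAS AND PROOFS =====

-- the right fold (= the reversed-foldl of B) computes A-shaped data: on a dot, the reversed prefix;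
-- with no dot, failure iff some element is none, else the whole reversed list
theorem kwargsReadyFoldr_spec (vs : List (Option String)) :
    vs.foldr (fun v s => kwargsReadyStep s v) (1, []) =
      match PySem.List.index? vs (some ".") with
      | some e => (0, (vs.take e).reverse)
      | none =>
        if vs.any (fun v => v == none) then (2, ([] : List (Option String)))
        else (1, vs.reverse) := by
  induction vs with
  | nil => simp [PySem.List.index?]
  | cons v rest ih =>
    by_cases hv : v = some "."
    · subst hv
      rw [PySem.List.index?_cons_self]
      simp [kwargsReadyStep]
    · rw [PySem.List.index?_cons_of_ne rest hv]
      simp only [List.foldr_cons, ih]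
      cases h : PySem.List.index? rest (some ".") with
      | some e =>
        cases v with
        | none => simp [kwargsReadyStep]
        | some s => simp_all [kwargsReadyStep]
      | none =>
        cases v with
        | none => by_cases hn : rest.any (fun v => v == none) <;> simp_all [kwargsReadyStep]
        | some s =>
          by_cases hn : rest.any (fun v => v == none) <;>
            simp_all [kwargsReadyStep]

theorem allmap_not_any (vs : List (Option String)) :
    ((vs.map (fun v => !(v == none))).all (fun b => b)) = !(vs.any (fun v => v == none)) := by
  induction vs with
  | nil => rfl
  | cons v rest ih => cases v <;> simp_all

theorem kwargs_ready_spec : Claim_equal_kwargs_ready := by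
  intro vs _ _
  unfold Spec_kwargs_ready kwargs_ready kwargs_ready_alt
  rw [List.foldl_reverse, kwargsReadyFoldr_spec vs]
  cases h : PySem.List.index? vs (some ".") with
  | some e =>
    simp [PySem.List.slice_to_natCast]
  | none =>
    rw [allmap_not_any]
    cases h2 : vs.any (fun v => v == none) <;> simp_all
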